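-- pv_equiv track=rewrite | github.com/mediassumani/TechInterviewPrep | InterviewPrepKit/Arrays/merge_changes.py | merge_changes
-- ===== SOURCE A (Python) =====
-- def merge_changes(time_slots):
--
--     condensed_slots = []
--
--     for index, slot in enumerate(time_slots):
--         curr_start_time = slot[0]
--         curr_end_time = slot[1]
--         new_slot = ()
--
--         for next_slot in time_slots[index+1:]:
--
--             new_start_time = None
--             new_end_time = None
--             # check if any time slot has an earlier start
--             if next_slot[0] < curr_start_time:
--                 # Update new start time
--                 new_start_time = next_slot[0]
--
--             # check if any time slot with start time less than curr end time
--             if next_slot[0] < curr_end_time: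
--                 # Update new end time
--                 new_end_time = next_slot[1]
--
--             if (new_start_time == None and new_end_time == None) :
--                 new_slot = (curr_start_time, curr_end_time)
--
--         if len(new_slot) == 2 :
--             condensed_slots.append(new_slot)
--     return condensed_slots
-- ===== SOURCE B (Python) =====
-- def merge_changes(time_slots):
--     # One backward pass keeping the running maximum of later start times:
--     # a slot is kept iff some later slot starts no earlier than both its start and its end.
--     kept_reversed = []
--     best = None  # max start time among the slots after the current one
--     for slot in reversed(time_slots):
--         start, end = slot[0], slot[1]
--         if best is not None and best >= start and best >= end:
--             kept_reversed.append((start, end))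
--         if best is None or start > best:
--             best = start
--     kept_reversed.reverse()
--     return kept_reversed
-- ===== Notes on version B (the rewrite author's own statement) =====
-- stated objective: faster
-- what changed: Replaced the quadratic scan of all later slots per slot by a single backward pass maintaining the running maximum of later start times, comparing each slot against that maximum.
import Mathlib
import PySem

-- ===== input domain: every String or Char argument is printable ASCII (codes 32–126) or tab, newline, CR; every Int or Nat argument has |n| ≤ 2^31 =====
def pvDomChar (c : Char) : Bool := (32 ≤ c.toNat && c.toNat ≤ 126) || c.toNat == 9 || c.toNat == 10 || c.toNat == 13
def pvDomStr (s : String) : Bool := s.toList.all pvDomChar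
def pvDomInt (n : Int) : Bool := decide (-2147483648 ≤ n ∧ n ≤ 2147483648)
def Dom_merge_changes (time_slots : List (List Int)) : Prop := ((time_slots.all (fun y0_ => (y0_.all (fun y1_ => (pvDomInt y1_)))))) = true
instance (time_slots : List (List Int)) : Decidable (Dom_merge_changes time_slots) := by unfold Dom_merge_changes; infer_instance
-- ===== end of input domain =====

-- B replaces A's quadratic scan of all later slots by one backward pass keeping
-- the running maximum of later start times (asymptotically faster); equivalence
-- is about the return value (neither program mutates its argument).

-- ===== PORT A =====
-- inner loop of A: 'for next_slot in time_slots[index+1:]', carrying new_slot across iterations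
def mcInner (curr_start curr_end : Int) (suffix : List (List Int)) : Option (Int × Int) :=
  suffix.foldl (fun new_slot next_slot =>
    let new_start_time : Option Int :=
      if PySem.List.pyGetD next_slot 0 0 < curr_start then some (PySem.List.pyGetD next_slot 0 0) else none
    let new_end_time : Option Int :=
      if PySem.List.pyGetD next_slot 0 0 < curr_end then some (PySem.List.pyGetD next_slot 1 0) else none
    if new_start_time = none ∧ new_end_time = none then some (curr_start, curr_end) else new_slot) none

def merge_changes (time_slots : List (List Int)) : List (List Int) :=
  (PySem.List.enumerate time_slots 0).foldl (fun condensed_slots p =>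
    let slot := p.2
    let curr_start_time := PySem.List.pyGetD slot 0 0
    let curr_end_time := PySem.List.pyGetD slot 1 0
    let new_slot := mcInner curr_start_time curr_end_time (PySem.List.slice time_slots (some (p.1 + 1)) none)
    match new_slot with
    | some (a, b) => condensed_slots ++ [[a, b]]
    | none => condensed_slots) []

-- ===== PORT B =====
def mcStep (st : Option Int × List (List Int)) (slot : List Int) : Option Int × List (List Int) :=
  let s := PySem.List.pyGetD slot 0 0
  let e := PySem.List.pyGetD slot 1 0
  let kept :=
    match st.1 with
    | some best => if best ≥ s ∧ best ≥ e then st.2 ++ [[s, e]] else st.2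
    | none => st.2
  let best' :=
    match st.1 with
    | none => some s
    | some best => if s > best then some s else some best
  (best', kept)

def merge_changes_alt (time_slots : List (List Int)) : List (List Int) :=
  (time_slots.reverse.foldl mcStep (none, [])).2.reverse

-- ===== PRECONDITION & SPEC =====
-- Pre_ excludes exactly the inputs where A raises IndexError: some slot shorter than 2.
def Pre_merge_changes (time_slots : List (List Int)) : Prop :=
  ∀ slot ∈ time_slots, 2 ≤ slot.length
instance (time_slots : List (List Int)) : Decidable (Pre_merge_changes time_slots) := by
  unfold Pre_merge_changes; infer_instance
def pvWitness_merge_changes : List (List Int) := [[1, 3], [4, 5], [2, 6], [7, 8]]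

def Spec_merge_changes (time_slots : List (List Int)) (out : List (List Int)) : Prop := out = merge_changes_alt time_slots
instance (time_slots : List (List Int)) (out : List (List Int)) : Decidable (Spec_merge_changes time_slots out) := by unfold Spec_merge_changes; infer_instance

-- ===== CLAIM (what is proved, stated in full; the proofs are below) =====
def Claim_equal_merge_changes : Prop := ∀ (time_slots : List (List Int)), Dom_merge_changes time_slots → Pre_merge_changes time_slots → Spec_merge_changes time_slots (merge_changes time_slots)

-- ===== LEMMAS AND PROOFS =====

-- reference function: keep slot x iff some later slot's start is ≥ both its start and end
def fSpec : List (List Int) → List (List Int)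
  | [] => []
  | x :: r =>
    (if r.any (fun y => decide (PySem.List.pyGetD x 0 0 ≤ PySem.List.pyGetD y 0 0) &&
        decide (PySem.List.pyGetD x 1 0 ≤ PySem.List.pyGetD y 0 0)) then
      [[PySem.List.pyGetD x 0 0, PySem.List.pyGetD x 1 0]] else []) ++ fSpec r

-- maximum of the start times of a list of slots (none for the empty list)
def maxStart : List (List Int) → Option Int
  | [] => none
  | x :: r =>
    match maxStart r with
    | none => some (PySem.List.pyGetD x 0 0)
    | some b => if PySem.List.pyGetD x 0 0 > b then some (PySem.List.pyGetD x 0 0) else some b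

theorem mcInner_eq (s e : Int) (l : List (List Int)) (init : Option (Int × Int)) :
    l.foldl (fun new_slot next_slot =>
      let new_start_time : Option Int :=
        if PySem.List.pyGetD next_slot 0 0 < s then some (PySem.List.pyGetD next_slot 0 0) else none
      let new_end_time : Option Int :=
        if PySem.List.pyGetD next_slot 0 0 < e then some (PySem.List.pyGetD next_slot 1 0) else none
      if new_start_time = none ∧ new_end_time = none then some (s, e) else new_slot) init
    = if l.any (fun y => decide (s ≤ PySem.List.pyGetD y 0 0) && decide (e ≤ PySem.List.pyGetD y 0 0))
      then some (s, e) else init := by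
  induction l generalizing init with
  | nil => simp
  | cons y t ih =>
    simp only [List.foldl_cons, List.any_cons, ih]
    by_cases h1 : PySem.List.pyGetD y 0 0 < s <;> by_cases h2 : PySem.List.pyGetD y 0 0 < e <;>
      simp [h1, h2, le_of_not_gt] <;>
      (split <;> simp_all [not_lt])

theorem merge_changes_aux (rest full : List (List Int)) (k : Nat)
    (h : full.drop k = rest) (acc : List (List Int)) :
    (PySem.List.enumerate rest (k : Int)).foldl (fun condensed_slots p =>
      let slot := p.2
      let curr_start_time := PySem.List.pyGetD slot 0 0
      let curr_end_time := PySem.List.pyGetD slot 1 0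
      let new_slot := mcInner curr_start_time curr_end_time (PySem.List.slice full (some (p.1 + 1)) none)
      match new_slot with
      | some (a, b) => condensed_slots ++ [[a, b]]
      | none => condensed_slots) acc
    = acc ++ fSpec rest := by
  induction rest generalizing k acc with
  | nil => simp [PySem.List.enumerate_nil, fSpec]
  | cons x r ih =>
    rw [PySem.List.enumerate_cons]
    simp only [List.foldl_cons]
    have hk1 : ((k : Int) + 1) = ((k + 1 : Nat) : Int) := by push_cast; ring
    have hdrop : full.drop (k + 1) = r := by
      have h1 : full.drop (k + 1) = (full.drop k).drop 1 := by
        rw [List.drop_drop]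
      rw [h1, h]
      rfl
    rw [hk1]
    rw [ih (k + 1) hdrop]
    simp only [PySem.List.slice_from_natCast, hdrop, mcInner, mcInner_eq]
    rw [fSpec]
    cases hc : r.any (fun y => decide (PySem.List.pyGetD x 0 0 ≤ PySem.List.pyGetD y 0 0) &&
        decide (PySem.List.pyGetD x 1 0 ≤ PySem.List.pyGetD y 0 0)) <;> simp_all

theorem merge_changes_eq_fSpec (ts : List (List Int)) : merge_changes ts = fSpec ts := by
  have h := merge_changes_aux ts ts 0 (by simp) []
  simpa [merge_changes] using h

theorem maxCond (s e : Int) (r : List (List Int)) :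
    (match maxStart r with
     | some b => decide (s ≤ b) && decide (e ≤ b)
     | none => false)
    = r.any (fun y => decide (s ≤ PySem.List.pyGetD y 0 0) && decide (e ≤ PySem.List.pyGetD y 0 0)) := by
  induction r with
  | nil => simp [maxStart]
  | cons y t ih =>
    cases hm : maxStart t with
    | none =>
      rw [hm] at ih
      have h1 : maxStart (y :: t) = some (PySem.List.pyGetD y 0 0) := by
        unfold maxStart; rw [hm]
      rw [h1, List.any_cons, ← ih]
      simp
    | some b =>
      rw [hm] at ih
      have h1 : maxStart (y :: t) = (if PySem.List.pyGetD y 0 0 > b then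
          some (PySem.List.pyGetD y 0 0) else some b) := by
        unfold maxStart; rw [hm]
      rw [h1, List.any_cons, ← ih]
      split_ifs with hgt <;>
        by_cases h1 : s ≤ PySem.List.pyGetD y 0 0 <;> by_cases h2 : e ≤ PySem.List.pyGetD y 0 0 <;>
        by_cases h3 : s ≤ b <;> by_cases h4 : e ≤ b <;> simp_all <;> omega

theorem altAux (l : List (List Int)) :
    l.reverse.foldl mcStep (none, []) = (maxStart l, (fSpec l).reverse) := by
  induction l with
  | nil => simp [maxStart, fSpec]
  | cons x r ih =>
    rw [List.reverse_cons, List.foldl_append, ih]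
    simp only [List.foldl_cons, List.foldl_nil]
    unfold mcStep
    have hmc := maxCond (PySem.List.pyGetD x 0 0) (PySem.List.pyGetD x 1 0) r
    cases hm : maxStart r with
    | none =>
      rw [hm] at hmc
      simp only at hmc
      have hpair : maxStart (x :: r) = some (PySem.List.pyGetD x 0 0) := by
        unfold maxStart; rw [hm]
      have hfs : fSpec (x :: r) = fSpec r := by
        rw [fSpec, ← hmc]
        simp
      rw [hpair, hfs]
    | some b =>
      rw [hm] at hmc
      simp only at hmc
      have hpair : maxStart (x :: r) = (if PySem.List.pyGetD x 0 0 > b then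
          some (PySem.List.pyGetD x 0 0) else some b) := by
        unfold maxStart; rw [hm]
      have hfs : fSpec (x :: r) = (if PySem.List.pyGetD x 0 0 ≤ b ∧ PySem.List.pyGetD x 1 0 ≤ b then
          [[PySem.List.pyGetD x 0 0, PySem.List.pyGetD x 1 0]] else []) ++ fSpec r := by
        rw [fSpec, ← hmc]
        by_cases h1 : PySem.List.pyGetD x 0 0 ≤ b <;> by_cases h2 : PySem.List.pyGetD x 1 0 ≤ b <;>
          simp [h1, h2]
      rw [hpair, hfs]
      split_ifs <;> simp_all

theorem alt_eq_fSpec (ts : List (List Int)) : merge_changes_alt ts = fSpec ts := by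
  unfold merge_changes_alt
  rw [altAux]
  simp

-- ===== VERDICT (by name: the statement is the Claim_ definition above) =====
theorem merge_changes_spec : Claim_equal_merge_changes := by
  intro ts _ _
  unfold Spec_merge_changes
  rw [merge_changes_eq_fSpec, alt_eq_fSpec]
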